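-- pv_equiv track=rewrite | github.com/HendrixMM/pharmaceutical-rag-knowledge-expert | scripts/docs_toc_generator.py | find_marker_indices
-- ===== SOURCE A (Python) =====
-- def find_marker_indices(lines: list[str], marker_start: str, marker_end: str) -> tuple[int | None, int | None]:
--     start_idx: int | None = None
--     end_idx: int | None = None
--     for i, line in enumerate(lines):
--         if start_idx is None and marker_start in line:
--             start_idx = i
--         if marker_end in line:
--             end_idx = i
--             break
--     return start_idx, end_idx
-- ===== SOURCE B (Python) =====
-- def find_marker_indices(lines: list[str], marker_start: str, marker_end: str) -> tuple[int | None, int | None]: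
--     end_idx = next((i for i, line in enumerate(lines) if marker_end in line), None)
--     limit = len(lines) if end_idx is None else end_idx + 1
--     start_idx = next((i for i, line in enumerate(lines[:limit]) if marker_start in line), None)
--     return start_idx, end_idx
-- ===== Notes on version B (the rewrite author's own statement) =====
-- stated objective: simpler
-- what changed: Replaced the single interleaved scan with coupled accumulator/break by two independent bounded scans: first find the end index, then search the inclusive prefix lines[:end_idx+1] (or all lines) for the start index.
import Mathlib
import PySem

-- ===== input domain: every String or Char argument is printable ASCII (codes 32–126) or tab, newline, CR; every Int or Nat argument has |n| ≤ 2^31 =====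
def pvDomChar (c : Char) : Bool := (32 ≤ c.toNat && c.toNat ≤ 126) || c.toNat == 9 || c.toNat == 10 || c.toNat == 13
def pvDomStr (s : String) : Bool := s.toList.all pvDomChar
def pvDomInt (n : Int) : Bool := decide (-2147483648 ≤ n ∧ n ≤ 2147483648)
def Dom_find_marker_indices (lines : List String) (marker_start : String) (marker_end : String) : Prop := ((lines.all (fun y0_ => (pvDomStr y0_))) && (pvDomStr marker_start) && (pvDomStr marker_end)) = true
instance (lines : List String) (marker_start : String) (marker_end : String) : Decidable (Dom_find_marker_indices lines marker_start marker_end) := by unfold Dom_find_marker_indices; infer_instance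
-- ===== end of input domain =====

-- B replaces A's single interleaved scan (start accumulator + coupled break) by two
-- independent bounded scans: find the end index first, then search the inclusive prefix
-- for the start index; same results, simpler decomposition (no speed claim).

-- ===== PORT A =====
-- A's single loop: carries the start accumulator, breaks at the first end-marker line.
def fmiA_loop (lines : List String) (i : Int) (start : Option Int)
    (marker_start marker_end : String) : Option Int × Option Int :=
  match lines with
  | [] => (start, none)
  | l :: rest =>
    let start' := if start = none ∧ PySem.Str.isIn marker_start l then some i else start
    if PySem.Str.isIn marker_end l then (start', some i)
    else fmiA_loop rest (i + 1) start' marker_start marker_end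

def find_marker_indices (lines : List String) (marker_start : String) (marker_end : String) : Option Int × Option Int :=
  fmiA_loop lines 0 none marker_start marker_end

-- ===== PORT B =====
-- first index i ≥ base whose line contains sub (port of the `next(… enumerate …)` scan)
def fmiB_find (lines : List String) (i : Int) (sub : String) : Option Int :=
  match lines with
  | [] => none
  | l :: rest => if PySem.Str.isIn sub l then some i else fmiB_find rest (i + 1) sub

def find_marker_indices_alt (lines : List String) (marker_start : String) (marker_end : String) : Option Int × Option Int :=
  let end_idx := fmiB_find lines 0 marker_end
  let limit : Int := match end_idx with
    | none => (lines.length : Int)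
    | some e => e + 1
  let start_idx := fmiB_find (PySem.List.slice lines none (some limit)) 0 marker_start
  (start_idx, end_idx)

-- ===== PRECONDITION & SPEC =====
def Spec_find_marker_indices (lines : List String) (marker_start : String) (marker_end : String) (out : Option Int × Option Int) : Prop := out = find_marker_indices_alt lines marker_start marker_end
instance (lines : List String) (marker_start : String) (marker_end : String) (out : Option Int × Option Int) : Decidable (Spec_find_marker_indices lines marker_start marker_end out) := by unfold Spec_find_marker_indices; infer_instance

-- ===== CLAIM (what is proved, stated in full; the proofs are below) =====
def Claim_equal_find_marker_indices : Prop := ∀ (lines : List String) (marker_start : String) (marker_end : String), Dom_find_marker_indices lines marker_start marker_end → Spec_find_marker_indices lines marker_start marker_end (find_marker_indices lines marker_start marker_end)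

-- ===== LEMMAS AND PROOFS =====

-- number of lines A's loop visits: up to and including the first end-marker line (all if none)
def fmiLimit (lines : List String) (marker_end : String) : Nat :=
  match lines with
  | [] => 0
  | l :: rest => if PySem.Str.isIn marker_end l then 1 else 1 + fmiLimit rest marker_end

theorem fmiB_find_none_limit (lines : List String) (me : String) (i : Int)
    (h : fmiB_find lines i me = none) : fmiLimit lines me = lines.length := by
  induction lines generalizing i with
  | nil => simp [fmiLimit]
  | cons l rest ih =>
    by_cases hc : PySem.Chars.isIn me.toList l.toList
    · simp [fmiB_find, hc] at h
    · simp only [fmiB_find, fmiLimit, PySem.Str.isIn, if_neg hc, List.length_cons] at h ⊢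
      rw [ih (i + 1) h]
      omega

theorem fmiB_find_some_limit (lines : List String) (me : String) (i e : Int)
    (h : fmiB_find lines i me = some e) :
    i ≤ e ∧ fmiLimit lines me = (e - i).toNat + 1 := by
  induction lines generalizing i with
  | nil => simp [fmiB_find] at h
  | cons l rest ih =>
    by_cases hc : PySem.Chars.isIn me.toList l.toList
    · simp [fmiB_find, hc] at h
      refine ⟨by omega, ?_⟩
      simp [fmiLimit, PySem.Str.isIn, hc]
      omega
    · simp only [fmiB_find, PySem.Str.isIn, if_neg hc] at h
      obtain ⟨h1, h2⟩ := ih (i + 1) h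
      refine ⟨by omega, ?_⟩
      simp only [fmiLimit, PySem.Str.isIn, if_neg hc, h2]
      omega

-- A's loop with a found start keeps it and only looks for the end
theorem fmiA_loop_some (lines : List String) (ms me : String) (i s : Int) :
    fmiA_loop lines i (some s) ms me = (some s, fmiB_find lines i me) := by
  induction lines generalizing i with
  | nil => simp [fmiA_loop, fmiB_find]
  | cons l rest ih =>
    simp only [fmiA_loop, fmiB_find]
    by_cases hc : PySem.Chars.isIn me.toList l.toList <;>
      simp [PySem.Str.isIn, hc, ih]

-- A's loop with no start yet = two scans over the visited prefix / the whole list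
theorem fmiA_loop_none (lines : List String) (ms me : String) (i : Int) :
    fmiA_loop lines i none ms me =
      (fmiB_find (lines.take (fmiLimit lines me)) i ms, fmiB_find lines i me) := by
  induction lines generalizing i with
  | nil => simp [fmiA_loop, fmiB_find, fmiLimit]
  | cons l rest ih =>
    by_cases hs : PySem.Chars.isIn ms.toList l.toList
    · by_cases hc : PySem.Chars.isIn me.toList l.toList
      · simp [fmiA_loop, fmiB_find, fmiLimit, PySem.Str.isIn, hs, hc]
      · have hone : 1 + fmiLimit rest me = fmiLimit rest me + 1 := by omega
        simp [fmiA_loop, fmiB_find, fmiLimit, PySem.Str.isIn, hs, hc, fmiA_loop_some,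
          hone, List.take_succ_cons]
    · by_cases hc : PySem.Chars.isIn me.toList l.toList
      · simp [fmiA_loop, fmiB_find, fmiLimit, PySem.Str.isIn, hs, hc]
      · simp only [fmiA_loop, fmiB_find, fmiLimit, PySem.Str.isIn, if_neg hc, if_neg hs,
          true_and]
        have hone : 1 + fmiLimit rest me = fmiLimit rest me + 1 := by omega
        rw [hone]
        simp only [List.take_succ_cons, fmiB_find, PySem.Str.isIn, if_neg hs]
        have := ih (i + 1)
        simp [this]

-- ===== VERDICT (by name: the statement is the Claim_ definition above) =====
theorem find_marker_indices_spec : Claim_equal_find_marker_indices := by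
  intro lines ms me _
  unfold Spec_find_marker_indices find_marker_indices find_marker_indices_alt
  rw [fmiA_loop_none]
  cases h : fmiB_find lines 0 me with
  | none =>
    rw [fmiB_find_none_limit lines me 0 h]
    simp [PySem.List.slice_to_natCast]
  | some e =>
    obtain ⟨h1, h2⟩ := fmiB_find_some_limit lines me 0 e h
    rw [h2]
    have hsl : PySem.List.slice lines none (some (e + 1)) = lines.take (e + 1).toNat :=
      PySem.List.slice_to lines (by omega)
    have he : (e - 0).toNat + 1 = (e + 1).toNat := by omega
    simp only [hsl, he]
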